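-- pv_equiv track=rewrite | github.com/anitaandonato/Atividades | quest9.py | afd_contem_101
-- ===== SOURCE A (Python) =====
-- def afd_contem_101(string):
--     estado = 'q0'
--     for simbolo in string:
--         if estado == 'q0':
--             if simbolo == '1':
--                 estado = 'q1'
--         elif estado == 'q1':
--             if simbolo == '0':
--                 estado = 'q2'
--         elif estado == 'q2':
--             if simbolo == '1':
--                 estado = 'q3'
--     return estado == 'q3'
-- ===== SOURCE B (Python) =====
-- def afd_contem_101(string):
--     i = string.find('1')
--     if i == -1:
--         return False
--     rest = string[i + 1:]
--     j = rest.find('0')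
--     if j == -1:
--         return False
--     return rest[j + 1:].find('1') != -1
-- ===== Notes on version B (the rewrite author's own statement) =====
-- stated objective: idiomatic
-- what changed: Replaced the single-pass four-state DFA loop with three staged str.find searches (first '1', then '0' in the remainder, then '1' after that), i.e. greedy subsequence matching by chained library searches instead of an explicit state machine.
import Mathlib
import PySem

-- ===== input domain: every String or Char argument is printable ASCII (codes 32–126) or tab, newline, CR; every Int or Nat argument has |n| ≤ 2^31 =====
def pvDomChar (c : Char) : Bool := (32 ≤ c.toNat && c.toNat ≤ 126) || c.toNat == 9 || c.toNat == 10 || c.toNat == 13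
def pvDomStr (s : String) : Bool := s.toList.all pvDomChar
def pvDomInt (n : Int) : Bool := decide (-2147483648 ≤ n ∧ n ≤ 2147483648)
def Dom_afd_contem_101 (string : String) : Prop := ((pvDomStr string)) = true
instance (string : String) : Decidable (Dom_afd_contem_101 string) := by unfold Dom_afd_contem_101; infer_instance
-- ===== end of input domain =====

-- ===== PORT A =====
-- B replaces A's explicit four-state DFA loop with three staged str.find searches (idiomatic; return-value equivalence).
def afd_contem_101 (string : String) : Bool :=
  (string.toList.foldl
    (fun estado simbolo =>
      if estado = "q0" then (if simbolo = '1' then "q1" else estado)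
      else if estado = "q1" then (if simbolo = '0' then "q2" else estado)
      else if estado = "q2" then (if simbolo = '1' then "q3" else estado)
      else estado)
    "q0") = "q3"

-- ===== PORT B =====
def afd_contem_101_alt (string : String) : Bool :=
  let i := PySem.Str.find string "1"
  if i = -1 then false
  else
    let rest := PySem.Str.slice string (some (i + 1)) none
    let j := PySem.Str.find rest "0"
    if j = -1 then false
    else decide (PySem.Str.find (PySem.Str.slice rest (some (j + 1)) none) "1" ≠ -1)

-- ===== PRECONDITION & SPEC =====
def Spec_afd_contem_101 (string : String) (out : Bool) : Prop := out = afd_contem_101_alt string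
instance (string : String) (out : Bool) : Decidable (Spec_afd_contem_101 string out) := by unfold Spec_afd_contem_101; infer_instance

-- ===== CLAIM (what is proved, stated in full; the proofs are below) =====
def Claim_equal_afd_contem_101 : Prop := ∀ (string : String), Dom_afd_contem_101 string → Spec_afd_contem_101 string (afd_contem_101 string)

-- ===== LEMMAS AND PROOFS =====

def fA : String → Char → String :=
  fun estado simbolo =>
    if estado = "q0" then (if simbolo = '1' then "q1" else estado)
    else if estado = "q1" then (if simbolo = '0' then "q2" else estado)
    else if estado = "q2" then (if simbolo = '1' then "q3" else estado)
    else estado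

theorem singleton_prefix_iff (c : Char) (m : List Char) : [c] <+: m ↔ m.head? = some c := by
  cases m with
  | nil => simp
  | cons a t => simp [List.cons_prefix_cons, eq_comm]

theorem fold_const {s s' : String} {c : Char}
    (hf : ∀ x, fA s x = if x = c then s' else s)
    {m : List Char} (h : ∀ x ∈ m, x ≠ c) : m.foldl fA s = s := by
  induction m with
  | nil => rfl
  | cons a t ih =>
    have ha : a ≠ c := h a (List.mem_cons_self ..)
    simp only [List.foldl, hf a, if_neg ha]
    exact ih (fun x hx => h x (List.mem_cons_of_mem _ hx))

theorem skip_fold {s s' : String} {c : Char}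
    (hf : ∀ x, fA s x = if x = c then s' else s) (l : List Char) :
    l.foldl fA s =
      (if PySem.Chars.find l [c] = -1 then s
       else (l.drop ((PySem.Chars.find l [c]).toNat + 1)).foldl fA s') := by
  by_cases hfind : PySem.Chars.find l [c] = -1
  · rw [if_pos hfind]
    have hni : ¬ [c] <:+: l := (PySem.Chars.find_eq_neg_one_iff l [c]).mp hfind
    refine fold_const hf (fun x hx hxc => hni ?_)
    subst hxc
    obtain ⟨u, v, huv⟩ := List.mem_iff_append.mp hx
    exact ⟨u, v, by simp [huv]⟩
  · rw [if_neg hfind]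
    have h0 : 0 ≤ PySem.Chars.find l [c] := by
      have := PySem.Chars.neg_one_le_find l [c]
      omega
    obtain ⟨hpre, hmin⟩ := PySem.Chars.find_spec h0
    set k : ℕ := (PySem.Chars.find l [c]).toNat with hk
    have hhead : (l.drop k).head? = some c := (singleton_prefix_iff c _).mp hpre
    have hget : l[k]? = some c := by
      rwa [List.head?_drop] at hhead
    have hklen : k < l.length := by
      by_contra hle
      rw [List.getElem?_eq_none (by omega)] at hget
      exact Option.some_ne_none c hget.symm
    have hdecomp : l = l.take k ++ c :: l.drop (k + 1) := by
      conv_lhs => rw [← List.take_append_drop k l]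
      congr 1
      rw [← List.getElem_cons_drop (as := l) (h := hklen)]
      congr 1
      exact (List.getElem?_eq_some_iff.mp hget).2.symm ▸ rfl
    have htake : ∀ x ∈ l.take k, x ≠ c := by
      intro x hx hxc
      obtain ⟨i, hi, hxi⟩ := List.getElem_of_mem hx
      have hik : i < k := by
        have := hi
        simp [List.length_take] at this
        omega
      refine hmin i hik ?_
      rw [singleton_prefix_iff, List.head?_drop]
      have hil : i < l.length := by omega
      rw [List.getElem?_eq_getElem hil]
      have : (l.take k)[i] = l[i] := List.getElem_take ..
      rw [← this, hxi, hxc]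
    conv_lhs => rw [hdecomp]
    rw [List.foldl_append, fold_const hf htake]
    simp only [List.foldl, hf c, if_true]

theorem q3_absorb (m : List Char) : m.foldl fA "q3" = "q3" := by
  induction m with
  | nil => rfl
  | cons a t ih => simpa [List.foldl, fA] using ih

-- ===== VERDICT (by name: the statement is the Claim_ definition above) =====
theorem afd_contem_101_spec : Claim_equal_afd_contem_101 := by
  intro s _
  unfold Spec_afd_contem_101 afd_contem_101 afd_contem_101_alt
  rw [show (fun estado simbolo =>
      if estado = "q0" then if simbolo = '1' then "q1" else estado
      else if estado = "q1" then if simbolo = '0' then "q2" else estado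
      else if estado = "q2" then if simbolo = '1' then "q3" else estado
      else estado) = fA from rfl]
  have hf0 : ∀ x, fA "q0" x = if x = '1' then "q1" else "q0" := by intro x; simp [fA]
  have hf1 : ∀ x, fA "q1" x = if x = '0' then "q2" else "q1" := by intro x; simp [fA]
  have hf2 : ∀ x, fA "q2" x = if x = '1' then "q3" else "q2" := by intro x; simp [fA]
  have e1 : ("1" : String).toList = ['1'] := rfl
  have e0 : ("0" : String).toList = ['0'] := rfl
  simp only [PySem.Str.find_eq, PySem.Str.toList_slice, PySem.Chars.slice_eq_listSlice, e1, e0]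
  rw [skip_fold hf0]
  by_cases h1 : PySem.Chars.find s.toList ['1'] = -1
  · simp [h1]
  · have h1n : 0 ≤ PySem.Chars.find s.toList ['1'] := by
      have := PySem.Chars.neg_one_le_find s.toList ['1']; omega
    rw [if_neg h1, PySem.List.slice_from _ (by omega)]
    have t1 : (PySem.Chars.find s.toList ['1'] + 1).toNat
        = (PySem.Chars.find s.toList ['1']).toNat + 1 := by omega
    rw [t1]
    rw [skip_fold hf1]
    by_cases h2 : PySem.Chars.find (s.toList.drop ((PySem.Chars.find s.toList ['1']).toNat + 1)) ['0'] = -1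
    · simp [h1, h2]
    · have h2n : 0 ≤ PySem.Chars.find (s.toList.drop ((PySem.Chars.find s.toList ['1']).toNat + 1)) ['0'] := by
        have := PySem.Chars.neg_one_le_find (s.toList.drop ((PySem.Chars.find s.toList ['1']).toNat + 1)) ['0']; omega
      rw [if_neg h2, PySem.List.slice_from _ (by omega)]
      have t2 : (PySem.Chars.find (s.toList.drop ((PySem.Chars.find s.toList ['1']).toNat + 1)) ['0'] + 1).toNat
          = (PySem.Chars.find (s.toList.drop ((PySem.Chars.find s.toList ['1']).toNat + 1)) ['0']).toNat + 1 := by omega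
      rw [t2]
      rw [skip_fold hf2]
      by_cases h3 : PySem.Chars.find (List.drop ((PySem.Chars.find (List.drop ((PySem.Chars.find s.toList ['1']).toNat + 1) s.toList) ['0']).toNat + 1) (List.drop ((PySem.Chars.find s.toList ['1']).toNat + 1) s.toList)) ['1'] = -1
      · rw [if_pos h3]
        simp only [List.drop_drop] at h3
        simp [h1, h2, h3]
      · rw [if_neg h3, q3_absorb]
        simp only [List.drop_drop] at h3
        simp [h1, h2, h3]
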